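-- pv_equiv track=rewrite | github.com/shobhitmishra/CodingProblems | absolutePermutation.py | GetConfigTransition
-- ===== SOURCE A (Python) =====
-- def GetConfigTransition(grid):
--     result = [list('O' * len(grid[0])) for word in grid]
--     for i in range(0,len(grid)):
--         for j in range(0,len(grid[i])):
--            #if there is a bomb at i,j, detonate
--            if grid[i][j] == 'O':
--                 result[i][j] = '.'
--                 # detonate surrounding bombs as well
--                 if i > 0:
--                    result[i-1][j] = '.'
--                 if i < len(grid) - 1:
--                     result[i+1][j] = '.'
--                 if j > 0:
--                     result[i][j-1] = '.'
--                 if j < len(grid[0]) - 1: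
--                     result[i][j+1] = '.'
--     return result
-- ===== SOURCE B (Python) =====
-- def GetConfigTransition(grid):
--     h = len(grid)
--     w = len(grid[0]) if grid else 0
--
--     def bomb(r, c):
--         return 0 <= r < h and 0 <= c < len(grid[r]) and grid[r][c] == 'O'
--
--     return [['.' if (bomb(i, j) or bomb(i - 1, j) or bomb(i + 1, j)
--                      or bomb(i, j - 1) or bomb(i, j + 1)) else 'O'
--              for j in range(w)]
--             for i in range(h)]
-- ===== Notes on version B (the rewrite author's own statement) =====
-- stated objective: alternative
-- what changed: B replaces A's scatter (pre-fill the result with 'O' and write '.' into a bomb's cell and its in-bounds orthogonal neighbours) by a pure per-cell gather that computes each output cell from the input neighbourhood alone.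
import Mathlib
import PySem

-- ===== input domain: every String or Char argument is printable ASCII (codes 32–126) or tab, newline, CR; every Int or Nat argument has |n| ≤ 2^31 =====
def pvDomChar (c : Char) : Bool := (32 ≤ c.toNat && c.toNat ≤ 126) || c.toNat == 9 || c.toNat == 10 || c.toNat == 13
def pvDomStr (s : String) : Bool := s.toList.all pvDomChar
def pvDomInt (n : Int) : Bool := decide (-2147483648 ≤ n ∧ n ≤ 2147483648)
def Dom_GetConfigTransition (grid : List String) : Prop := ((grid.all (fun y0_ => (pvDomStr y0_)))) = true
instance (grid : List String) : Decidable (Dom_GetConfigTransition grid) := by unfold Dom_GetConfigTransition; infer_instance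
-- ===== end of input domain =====

-- B replaces A's scatter (pre-filled result mutated by writes into neighbour cells) by a pure
-- per-cell gather that reads the input neighbourhood; objective: alternative decomposition.

-- ===== PORT A =====
-- in-place write result[i][j] = "." (out-of-range writes cannot occur inside Pre_)
def pvSet2 (res : List (List String)) (i j : Nat) : List (List String) :=
  res.modify i (fun row => row.set j ".")

def GetConfigTransition (grid : List String) : List (List String) :=
  let w := ((grid.headD "").toList).length
  (List.range grid.length).foldl (fun result i =>
    (List.range ((grid.getD i "").toList).length).foldl (fun result j =>
      if ((grid.getD i "").toList).getD j ' ' = 'O' then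
        let r1 := pvSet2 result i j
        let r2 := if 0 < i then pvSet2 r1 (i - 1) j else r1
        let r3 := if i < grid.length - 1 then pvSet2 r2 (i + 1) j else r2
        let r4 := if 0 < j then pvSet2 r3 i (j - 1) else r3
        let r5 := if j < w - 1 then pvSet2 r4 i (j + 1) else r4
        r5
      else result) result)
    (grid.map (fun _ => List.replicate w "O"))

-- ===== PORT B =====
-- Source B's helper bomb(r, c): in-bounds test plus character test, on possibly negative indices
def pvBomb (grid : List String) (r c : Int) : Bool :=
  decide (0 ≤ r) && decide (r < (grid.length : Int)) && decide (0 ≤ c) &&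
  decide (c < ((((grid.getD r.toNat "").toList)).length : Int)) &&
  (((grid.getD r.toNat "").toList).getD c.toNat ' ' == 'O')

def GetConfigTransition_alt (grid : List String) : List (List String) :=
  let h := grid.length
  let w := if grid.isEmpty then 0 else ((grid.headD "").toList).length
  (List.range h).map (fun (i : Nat) =>
    (List.range w).map (fun (j : Nat) =>
      if pvBomb grid (i : Int) (j : Int) || pvBomb grid ((i : Int) - 1) (j : Int) ||
         pvBomb grid ((i : Int) + 1) (j : Int) || pvBomb grid (i : Int) ((j : Int) - 1) ||
         pvBomb grid (i : Int) ((j : Int) + 1)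
      then "." else "O"))

-- ===== PRECONDITION & SPEC =====
-- Pre_ excludes exactly the inputs on which A raises IndexError: a grid with a bomb 'O' at a
-- column ≥ len(grid[0]) in some over-long row (A then writes past the end of a result row).
def Pre_GetConfigTransition (grid : List String) : Prop :=
  ∀ s ∈ grid, ∀ j ∈ List.range s.toList.length,
    s.toList.getD j ' ' = 'O' → j < ((grid.headD "").toList).length
instance (grid : List String) : Decidable (Pre_GetConfigTransition grid) := by
  unfold Pre_GetConfigTransition; infer_instance

def pvWitness_GetConfigTransition : List String := ["O..", ".O."]

def Spec_GetConfigTransition (grid : List String) (out : List (List String)) : Prop := out = GetConfigTransition_alt grid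
instance (grid : List String) (out : List (List String)) : Decidable (Spec_GetConfigTransition grid out) := by unfold Spec_GetConfigTransition; infer_instance

-- ===== CLAIM (what is proved, stated in full; the proofs are below) =====
def Claim_equal_GetConfigTransition : Prop := ∀ (grid : List String), Dom_GetConfigTransition grid → Pre_GetConfigTransition grid → Spec_GetConfigTransition grid (GetConfigTransition grid)

-- ===== LEMMAS AND PROOFS =====

-- the grid's rows / sizes, and A's loop body flattened to the list of cells it writes "." into
def pvRow (grid : List String) (i : Nat) : List Char := ((grid.getD i "").toList)
def pvW (grid : List String) : Nat := ((grid.headD "").toList).length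

def pvWrites (grid : List String) : List (Nat × Nat) :=
  (List.range grid.length).flatMap (fun i =>
    (List.range (pvRow grid i).length).flatMap (fun j =>
      if (pvRow grid i).getD j ' ' = 'O' then
        [(i, j)] ++ (if 0 < i then [(i - 1, j)] else []) ++
        (if i < grid.length - 1 then [(i + 1, j)] else []) ++
        (if 0 < j then [(i, j - 1)] else []) ++
        (if j < pvW grid - 1 then [(i, j + 1)] else [])
      else []))

def pvCell (res : List (List String)) (r c : Nat) : String := ((res[r]?).getD [])[c]?.getD "?"

-- shape invariant: h rows of width w
def pvShape (grid : List String) (res : List (List String)) : Prop :=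
  res.length = grid.length ∧ ∀ r : Nat, ((res[r]?).getD []).length = if r < grid.length then pvW grid else 0

-- Nat-level bomb predicate
def pvBombN (grid : List String) (i j : Nat) : Prop :=
  i < grid.length ∧ j < (pvRow grid i).length ∧ (pvRow grid i).getD j ' ' = 'O'

theorem pvLemA_as_writes (grid : List String) :
    GetConfigTransition grid =
      (pvWrites grid).foldl (fun res p => pvSet2 res p.1 p.2)
        (grid.map (fun _ => List.replicate (pvW grid) "O")) := by
  unfold GetConfigTransition pvWrites pvW pvRow
  rw [List.foldl_flatMap]
  refine List.foldl_ext _ _ _ (fun res i _ => ?_)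
  rw [List.foldl_flatMap]
  refine List.foldl_ext _ _ _ (fun res' j _ => ?_)
  split_ifs with hO <;> simp [List.foldl]

theorem pvShape_set2 (grid : List String) (res : List (List String)) (i j : Nat)
    (h : pvShape grid res) : pvShape grid (pvSet2 res i j) := by
  obtain ⟨h1, h2⟩ := h
  refine ⟨by simp [pvSet2, h1], fun r => ?_⟩
  simp only [pvSet2, List.getElem?_modify]
  cases hres : res[r]? with
  | none => simpa [hres] using h2 r
  | some row =>
      have := h2 r
      rw [hres] at this
      by_cases hir : i = r <;> simp [hir] at this ⊢ <;> omega

theorem pvCell_set2 (res : List (List String)) (i j r c : Nat) :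
    pvCell (pvSet2 res i j) r c =
      if i = r ∧ j = c ∧ r < res.length ∧ c < ((res[r]?).getD []).length then "."
      else pvCell res r c := by
  simp only [pvCell, pvSet2, List.getElem?_modify]
  by_cases hr : r < res.length
  · have hres : res[r]? = some (res[r]) := List.getElem?_eq_getElem hr
    simp only [hres, Option.getD_some]
    by_cases hij : i = r
    · simp only [hij]
      by_cases hjc : j = c
      · subst hij hjc
        by_cases hcl : j < (res[i]).length
        · simp [hcl, hr]
        · simp [hcl, hr]
      · simp [hjc, hr]
    · simp [hij]
  · have hres : res[r]? = none := List.getElem?_eq_none (by omega)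
    simp [hr]

theorem pvCell_foldl (grid : List String) (ws : List (Nat × Nat)) (res : List (List String))
    (hws : ∀ p ∈ ws, p.1 < grid.length ∧ p.2 < pvW grid)
    (hres : pvShape grid res) (r c : Nat) :
    pvCell (ws.foldl (fun res p => pvSet2 res p.1 p.2) res) r c =
      if (r, c) ∈ ws then "." else pvCell res r c := by
  induction ws generalizing res with
  | nil => simp
  | cons p ws ih =>
      simp only [List.foldl_cons]
      rw [ih _ (fun q hq => hws q (List.mem_cons_of_mem _ hq)) (pvShape_set2 _ _ _ _ hres)]
      rw [pvCell_set2]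
      by_cases hmem : (r, c) ∈ ws
      · rw [if_pos hmem, if_pos (List.mem_cons_of_mem _ hmem)]
      · by_cases hp : p.1 = r ∧ p.2 = c
        · obtain ⟨hb1, hb2⟩ := hws p (List.mem_cons_self)
          have hrg : r < grid.length := hp.1 ▸ hb1
          have hrl : r < res.length := by rw [hres.1]; exact hrg
          have hcl : c < ((res[r]?).getD []).length := by
            have h2 := hres.2 r
            rw [if_pos hrg] at h2
            rw [h2]
            exact hp.2 ▸ hb2
          have hmem' : (r, c) ∈ p :: ws := by
            have hpe : p = (r, c) := Prod.ext hp.1 hp.2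
            simp [hpe]
          rw [if_neg hmem, if_pos ⟨hp.1, hp.2, hrl, hcl⟩, if_pos hmem']
        · have hmem' : ¬ (r, c) ∈ p :: ws := by
            simp only [List.mem_cons, not_or]
            refine ⟨fun h => hp ⟨by rw [← h], by rw [← h]⟩, hmem⟩
          rw [if_neg hmem, if_neg (fun h => hp ⟨h.1, h.2.1⟩), if_neg hmem']

theorem pvMem_block (grid : List String) (i j : Nat) (p : Nat × Nat) :
    (p ∈ [(i, j)] ++ (if 0 < i then [(i - 1, j)] else []) ++
        (if i < grid.length - 1 then [(i + 1, j)] else []) ++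
        (if 0 < j then [(i, j - 1)] else []) ++
        (if j < pvW grid - 1 then [(i, j + 1)] else [])) ↔
      (p = (i, j) ∨ (0 < i ∧ p = (i - 1, j)) ∨ (i < grid.length - 1 ∧ p = (i + 1, j)) ∨
       (0 < j ∧ p = (i, j - 1)) ∨ (j < pvW grid - 1 ∧ p = (i, j + 1))) := by
  split_ifs <;>
    simp only [List.mem_append, List.mem_cons, List.not_mem_nil, or_false] <;> tauto

theorem pvWrites_bounded (grid : List String) (hpre : Pre_GetConfigTransition grid) :
    ∀ p ∈ pvWrites grid, p.1 < grid.length ∧ p.2 < pvW grid := by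
  intro p hp
  simp only [pvWrites, List.mem_flatMap, List.mem_range] at hp
  obtain ⟨i, hi, j, hj, hmem⟩ := hp
  by_cases hO : (pvRow grid i).getD j ' ' = 'O'
  · have hjw : j < pvW grid := by
      have hig : grid.getD i "" ∈ grid := by
        rw [List.getD_eq_getElem?_getD, List.getElem?_eq_getElem hi]
        exact List.getElem_mem hi
      exact hpre _ hig j (List.mem_range.mpr hj) hO
    rw [if_pos hO, pvMem_block] at hmem
    rcases hmem with rfl | ⟨hg, rfl⟩ | ⟨hg, rfl⟩ | ⟨hg, rfl⟩ | ⟨hg, rfl⟩ <;>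
      exact ⟨by omega, by omega⟩
  · rw [if_neg hO] at hmem; simp at hmem

theorem pvMem_writes (grid : List String) (r c : Nat)
    (hr : r < grid.length) (hc : c < pvW grid) :
    ((r, c) ∈ pvWrites grid) ↔
      (pvBombN grid r c ∨ (0 < r ∧ pvBombN grid (r - 1) c) ∨ pvBombN grid (r + 1) c ∨
       (0 < c ∧ pvBombN grid r (c - 1)) ∨ pvBombN grid r (c + 1)) := by
  simp only [pvWrites, List.mem_flatMap, List.mem_range]
  constructor
  · rintro ⟨i, hi, j, hj, hmem⟩
    by_cases hO : (pvRow grid i).getD j ' ' = 'O'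
    · rw [if_pos hO, pvMem_block] at hmem
      have hbij : pvBombN grid i j := ⟨hi, hj, hO⟩
      rcases hmem with he | ⟨hg, he⟩ | ⟨hg, he⟩ | ⟨hg, he⟩ | ⟨hg, he⟩ <;>
        rw [Prod.mk.injEq] at he <;> obtain ⟨h1, h2⟩ := he
      · exact Or.inl (by rw [h1, h2]; exact hbij)
      · refine Or.inr (Or.inr (Or.inl ?_))
        have e1 : i = r + 1 := by omega
        rw [← e1, h2]; exact hbij
      · refine Or.inr (Or.inl ⟨by omega, ?_⟩)
        have e1 : i = r - 1 := by omega
        rw [← e1, h2]; exact hbij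
      · refine Or.inr (Or.inr (Or.inr (Or.inr ?_)))
        have e1 : j = c + 1 := by omega
        rw [h1, ← e1]; exact hbij
      · refine Or.inr (Or.inr (Or.inr (Or.inl ⟨by omega, ?_⟩)))
        have e1 : j = c - 1 := by omega
        rw [h1, ← e1]; exact hbij
    · rw [if_neg hO] at hmem; simp at hmem
  · rintro (h | ⟨hg, h⟩ | h | ⟨hg, h⟩ | h)
    · refine ⟨r, h.1, c, h.2.1, ?_⟩
      rw [if_pos h.2.2, pvMem_block]
      exact Or.inl rfl
    · refine ⟨r - 1, h.1, c, h.2.1, ?_⟩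
      rw [if_pos h.2.2, pvMem_block]
      refine Or.inr (Or.inr (Or.inl ⟨by omega, by rw [Prod.mk.injEq]; omega⟩))
    · refine ⟨r + 1, h.1, c, h.2.1, ?_⟩
      rw [if_pos h.2.2, pvMem_block]
      refine Or.inr (Or.inl ⟨by omega, by rw [Prod.mk.injEq]; omega⟩)
    · refine ⟨r, h.1, c - 1, h.2.1, ?_⟩
      rw [if_pos h.2.2, pvMem_block]
      refine Or.inr (Or.inr (Or.inr (Or.inr ⟨by omega, by rw [Prod.mk.injEq]; omega⟩)))
    · refine ⟨r, h.1, c + 1, h.2.1, ?_⟩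
      rw [if_pos h.2.2, pvMem_block]
      refine Or.inr (Or.inr (Or.inr (Or.inl ⟨by omega, by rw [Prod.mk.injEq]; omega⟩)))

theorem pvBomb_nat (grid : List String) (i j : Nat) :
    pvBomb grid i j = true ↔ pvBombN grid i j := by
  simp only [pvBomb, pvBombN, pvRow, Bool.and_eq_true, decide_eq_true_eq, beq_iff_eq,
    Int.toNat_natCast, Nat.cast_lt, Int.natCast_nonneg, true_and]
  tauto

theorem pvBomb_sub_one_row (grid : List String) (i j : Nat) :
    pvBomb grid ((i : Int) - 1) j = true ↔ (0 < i ∧ pvBombN grid (i - 1) j) := by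
  rcases Nat.eq_zero_or_pos i with h0 | h0
  · subst h0
    simp [pvBomb]
  · have hcast : (i : Int) - 1 = ((i - 1 : Nat) : Int) := by omega
    rw [hcast, pvBomb_nat]
    simp [h0]

theorem pvBomb_sub_one_col (grid : List String) (i j : Nat) :
    pvBomb grid i ((j : Int) - 1) = true ↔ (0 < j ∧ pvBombN grid i (j - 1)) := by
  rcases Nat.eq_zero_or_pos j with h0 | h0
  · subst h0
    simp [pvBomb]
  · have hcast : (j : Int) - 1 = ((j - 1 : Nat) : Int) := by omega
    rw [hcast, pvBomb_nat]
    simp [h0]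

theorem pvShape_foldl (grid : List String) (ws : List (Nat × Nat)) (res : List (List String))
    (h : pvShape grid res) :
    pvShape grid (ws.foldl (fun res p => pvSet2 res p.1 p.2) res) := by
  induction ws generalizing res with
  | nil => exact h
  | cons p ws ih => exact ih _ (pvShape_set2 _ _ _ _ h)

theorem pvShape_init (grid : List String) :
    pvShape grid (grid.map (fun _ => List.replicate (pvW grid) "O")) := by
  refine ⟨by simp, fun r => ?_⟩
  by_cases hr : r < grid.length
  · rw [List.getElem?_map, List.getElem?_eq_getElem hr]
    simp [hr]
  · rw [List.getElem?_map, List.getElem?_eq_none (by omega)]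
    simp [hr]

theorem pvCell_init (grid : List String) (r c : Nat) (hr : r < grid.length) (hc : c < pvW grid) :
    pvCell (grid.map (fun _ => List.replicate (pvW grid) "O")) r c = "O" := by
  simp [pvCell, hc, hr]

theorem pvCond_iff (grid : List String) (r c : Nat) :
    (pvBomb grid r c || pvBomb grid ((r : Int) - 1) c || pvBomb grid ((r : Int) + 1) c ||
      pvBomb grid r ((c : Int) - 1) || pvBomb grid r ((c : Int) + 1)) = true ↔
      (pvBombN grid r c ∨ (0 < r ∧ pvBombN grid (r - 1) c) ∨ pvBombN grid (r + 1) c ∨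
       (0 < c ∧ pvBombN grid r (c - 1)) ∨ pvBombN grid r (c + 1)) := by
  have h1 : (r : Int) + 1 = ((r + 1 : Nat) : Int) := by push_cast; ring
  have h2 : (c : Int) + 1 = ((c + 1 : Nat) : Int) := by push_cast; ring
  rw [h1, h2]
  simp only [Bool.or_eq_true, pvBomb_nat, pvBomb_sub_one_row, pvBomb_sub_one_col]
  tauto

-- ===== VERDICT (by name: the statement is the Claim_ definition above) =====
theorem GetConfigTransition_spec : Claim_equal_GetConfigTransition := by
  intro grid _ hpre
  unfold Spec_GetConfigTransition GetConfigTransition_alt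
  by_cases hnil : grid = []
  · subst hnil; rfl
  · have hE : grid.isEmpty = false := by
      cases grid with
      | nil => exact absurd rfl hnil
      | cons a l => rfl
    rw [pvLemA_as_writes]
    simp only [hE, Bool.false_eq_true, if_false]
    rw [show ((grid.headD "").toList).length = pvW grid from rfl]
    obtain ⟨hlen, hrow⟩ :=
      pvShape_foldl grid (pvWrites grid) (grid.map (fun _ => List.replicate (pvW grid) "O"))
        (pvShape_init grid)
    apply List.ext_getElem?
    intro r
    by_cases hr : r < grid.length
    · have hrL : r < ((pvWrites grid).foldl (fun res p => pvSet2 res p.1 p.2)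
          (grid.map (fun _ => List.replicate (pvW grid) "O"))).length := by rw [hlen]; exact hr
      rw [List.getElem?_map, List.getElem?_range hr, Option.map_some,
        List.getElem?_eq_getElem hrL]
      congr 1
      have hrowlen := hrow r
      rw [if_pos hr, List.getElem?_eq_getElem hrL, Option.getD_some] at hrowlen
      apply List.ext_getElem?
      intro c
      by_cases hc : c < pvW grid
      · have hcL : c < (((pvWrites grid).foldl (fun res p => pvSet2 res p.1 p.2)
            (grid.map (fun _ => List.replicate (pvW grid) "O")))[r]).length := by
          rw [hrowlen]; exact hc
        rw [List.getElem?_map, List.getElem?_range hc, Option.map_some,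
          List.getElem?_eq_getElem hcL]
        congr 1
        have hcell : pvCell ((pvWrites grid).foldl (fun res p => pvSet2 res p.1 p.2)
            (grid.map (fun _ => List.replicate (pvW grid) "O"))) r c =
            ((pvWrites grid).foldl (fun res p => pvSet2 res p.1 p.2)
              (grid.map (fun _ => List.replicate (pvW grid) "O")))[r][c] := by
          simp only [pvCell, List.getElem?_eq_getElem hrL, Option.getD_some,
            List.getElem?_eq_getElem hcL]
        rw [← hcell,
          pvCell_foldl grid (pvWrites grid) _ (pvWrites_bounded grid hpre) (pvShape_init grid),
          pvCell_init grid r c hr hc]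
        by_cases hm : (r, c) ∈ pvWrites grid
        · rw [if_pos hm, if_pos (pvCond_iff grid r c |>.mpr ((pvMem_writes grid r c hr hc).mp hm))]
        · rw [if_neg hm,
            if_neg (fun hcond => hm ((pvMem_writes grid r c hr hc).mpr ((pvCond_iff grid r c).mp hcond)))]
      · rw [List.getElem?_eq_none (by rw [hrowlen]; omega),
          List.getElem?_map, List.getElem?_eq_none (by simpa using hc), Option.map_none]
    · rw [List.getElem?_eq_none (by rw [hlen]; omega),
        List.getElem?_map, List.getElem?_eq_none (by simpa using hr), Option.map_none]
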